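-- pv_equiv track=rewrite | github.com/CA-git-com-co/ACGS | services/core/worker_agents/legal_agent.py | _generate_ccpa_recommendations
-- ===== SOURCE A (Python) =====
-- from typing import Any, Dict, List, Optional, Set
--
-- def _generate_ccpa_recommendations(violations: List[str]) -> List[str]:
--     """Generate CCPA compliance recommendations"""
--     recommendations = []
--
--     if any('consumer rights' in v for v in violations):
--         recommendations.append('Implement all required consumer rights (know, delete, opt-out, non-discrimination)')
--
--     if any('privacy policy' in v for v in violations):
--         recommendations.append('Update privacy policy to meet CCPA disclosure requirements')
--
--     if any('opt-out' in v for v in violations):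
--         recommendations.append('Implement opt-out mechanisms for data sales')
--
--     return recommendations
-- ===== SOURCE B (Python) =====
-- from typing import List
--
-- def _generate_ccpa_recommendations(violations: List[str]) -> List[str]:
--     """Generate CCPA compliance recommendations (single-pass flag accumulation)"""
--     needs_rights = needs_policy = needs_optout = False
--     for v in violations:
--         if 'consumer rights' in v:
--             needs_rights = True
--         if 'privacy policy' in v:
--             needs_policy = True
--         if 'opt-out' in v:
--             needs_optout = True
--     recommendations = []
--     if needs_rights:
--         recommendations.append('Implement all required consumer rights (know, delete, opt-out, non-discrimination)')
--     if needs_policy: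
--         recommendations.append('Update privacy policy to meet CCPA disclosure requirements')
--     if needs_optout:
--         recommendations.append('Implement opt-out mechanisms for data sales')
--     return recommendations
-- ===== Notes on version B (the rewrite author's own statement) =====
-- stated objective: alternative
-- what changed: Replaces three independent any() scans over the violations list with a single pass that accumulates three boolean flags, then emits the fixed recommendation strings in canonical order.
import Mathlib
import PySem

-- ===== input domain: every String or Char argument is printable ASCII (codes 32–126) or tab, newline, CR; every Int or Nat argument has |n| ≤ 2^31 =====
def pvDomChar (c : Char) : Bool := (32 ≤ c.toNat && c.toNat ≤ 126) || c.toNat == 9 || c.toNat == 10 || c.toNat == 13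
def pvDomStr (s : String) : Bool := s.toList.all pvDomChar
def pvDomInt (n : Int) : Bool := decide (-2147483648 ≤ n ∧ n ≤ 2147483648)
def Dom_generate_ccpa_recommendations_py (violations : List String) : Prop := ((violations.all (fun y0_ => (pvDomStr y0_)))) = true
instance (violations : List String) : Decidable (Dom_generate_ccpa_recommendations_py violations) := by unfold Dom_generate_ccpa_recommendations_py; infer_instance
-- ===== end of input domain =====

-- B replaces A's three independent any() scans with one pass accumulating three boolean flags (alternative decomposition, same cost class).

-- ===== PORT A =====
def generate_ccpa_recommendations_py (violations : List String) : List String :=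
  let recommendations : List String := []
  let recommendations :=
    if violations.any (fun v => PySem.Str.isIn "consumer rights" v) then
      recommendations ++ ["Implement all required consumer rights (know, delete, opt-out, non-discrimination)"]
    else recommendations
  let recommendations :=
    if violations.any (fun v => PySem.Str.isIn "privacy policy" v) then
      recommendations ++ ["Update privacy policy to meet CCPA disclosure requirements"]
    else recommendations
  let recommendations :=
    if violations.any (fun v => PySem.Str.isIn "opt-out" v) then
      recommendations ++ ["Implement opt-out mechanisms for data sales"]
    else recommendations
  recommendations

-- ===== PORT B =====
def generate_ccpa_recommendations_py_alt (violations : List String) : List String :=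
  let flags := violations.foldl
    (fun (st : Bool × Bool × Bool) v =>
      ( if PySem.Str.isIn "consumer rights" v then true else st.1,
        if PySem.Str.isIn "privacy policy" v then true else st.2.1,
        if PySem.Str.isIn "opt-out" v then true else st.2.2 ))
    (false, false, false)
  let recommendations : List String := []
  let recommendations :=
    if flags.1 then recommendations ++ ["Implement all required consumer rights (know, delete, opt-out, non-discrimination)"] else recommendations
  let recommendations :=
    if flags.2.1 then recommendations ++ ["Update privacy policy to meet CCPA disclosure requirements"] else recommendations
  let recommendations :=
    if flags.2.2 then recommendations ++ ["Implement opt-out mechanisms for data sales"] else recommendations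
  recommendations

-- ===== PRECONDITION & SPEC =====
def Spec_generate_ccpa_recommendations_py (violations : List String) (out : List String) : Prop := out = generate_ccpa_recommendations_py_alt violations
instance (violations : List String) (out : List String) : Decidable (Spec_generate_ccpa_recommendations_py violations out) := by unfold Spec_generate_ccpa_recommendations_py; infer_instance

-- ===== CLAIM (what is proved, stated in full; the proofs are below) =====
def Claim_equal_generate_ccpa_recommendations_py : Prop := ∀ (violations : List String), Dom_generate_ccpa_recommendations_py violations → Spec_generate_ccpa_recommendations_py violations (generate_ccpa_recommendations_py violations)

-- ===== LEMMAS AND PROOFS =====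

-- B's single-pass flag fold computes exactly the three any() scans of A.
theorem pv_flags_eq (violations : List String) (s : Bool × Bool × Bool) :
    violations.foldl
      (fun (st : Bool × Bool × Bool) v =>
        ( if PySem.Str.isIn "consumer rights" v then true else st.1,
          if PySem.Str.isIn "privacy policy" v then true else st.2.1,
          if PySem.Str.isIn "opt-out" v then true else st.2.2 )) s
    = ( s.1 || violations.any (fun v => PySem.Str.isIn "consumer rights" v),
        s.2.1 || violations.any (fun v => PySem.Str.isIn "privacy policy" v),
        s.2.2 || violations.any (fun v => PySem.Str.isIn "opt-out" v) ) := by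
  induction violations generalizing s with
  | nil => simp
  | cons v vs ih =>
    simp only [List.foldl_cons, List.any_cons, ih]
    obtain ⟨a, b, c⟩ := s
    by_cases h1 : PySem.Str.isIn "consumer rights" v <;>
      by_cases h2 : PySem.Str.isIn "privacy policy" v <;>
        by_cases h3 : PySem.Str.isIn "opt-out" v <;>
          simp [h1, h2, h3, Bool.or_comm, Bool.or_left_comm, Bool.or_assoc]

-- ===== VERDICT (by name: the statement is the Claim_ definition above) =====
theorem generate_ccpa_recommendations_py_spec : Claim_equal_generate_ccpa_recommendations_py := by
  intro violations _
  unfold Spec_generate_ccpa_recommendations_py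
  unfold generate_ccpa_recommendations_py generate_ccpa_recommendations_py_alt
  simp only [pv_flags_eq, Bool.false_or]
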